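-- pv_equiv track=rewrite | github.com/damienriehl/folio-mapper | backend/app/services/branch_sort.py | sort_branches
-- ===== SOURCE A (Python) =====
-- DEFAULT_BRANCH_ORDER: list[str] = [
--     "Area of Law",
--     "Service",
--     "Objectives",
--     "Industry and Market",
--     "Actor / Player",
--     "Forums and Venues",
--     "Governmental Body",
--     "Document / Artifact",
--     "Legal Entity",
--     "Event",
--     "Location",
--     "Engagement Attributes",
--     "Asset Type",
--     "Legal Authorities",
--     "Legal Use Cases",
--     "Status",
--     "Communication Modality",
--     "Financial Concepts and Metrics",
--     "Currency",
--     "Matter Narrative",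
--     "Data Format",
--     "Language",
--     "System Identifiers",
-- ]
--
-- def sort_branches(
--     branch_list: list[str],
--     mode: str = "default",
--     custom_order: list[str] | None = None,
-- ) -> list[str]:
--     """Sort branch names according to the specified mode.
--
--     Args:
--         branch_list: Branch names to sort.
--         mode: "default" (PRD order), "alphabetical", or "custom".
--         custom_order: Used when mode is "custom".
--
--     Returns:
--         Sorted list of branch names.
--     """
--     if mode == "alphabetical":
--         return sorted(branch_list)
--
--     if mode == "custom" and custom_order:
--         order_map = {name: i for i, name in enumerate(custom_order)}
--         fallback = len(custom_order)
--         return sorted(branch_list, key=lambda b: (order_map.get(b, fallback), b))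
--
--     # Default: PRD order
--     order_map = {name: i for i, name in enumerate(DEFAULT_BRANCH_ORDER)}
--     fallback = len(DEFAULT_BRANCH_ORDER)
--     return sorted(branch_list, key=lambda b: (order_map.get(b, fallback), b))
-- ===== SOURCE B (Python) =====
-- DEFAULT_BRANCH_ORDER: list[str] = [
--     "Area of Law",
--     "Service",
--     "Objectives",
--     "Industry and Market",
--     "Actor / Player",
--     "Forums and Venues",
--     "Governmental Body",
--     "Document / Artifact",
--     "Legal Entity",
--     "Event",
--     "Location",
--     "Engagement Attributes",
--     "Asset Type",
--     "Legal Authorities",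
--     "Legal Use Cases",
--     "Status",
--     "Communication Modality",
--     "Financial Concepts and Metrics",
--     "Currency",
--     "Matter Narrative",
--     "Data Format",
--     "Language",
--     "System Identifiers",
-- ]
--
--
-- def sort_branches(
--     branch_list: list[str],
--     mode: str = "default",
--     custom_order: list[str] | None = None,
-- ) -> list[str]:
--     """Bucket-distribution sort: one pass over branch_list routes each name to
--     the bucket of its order index (or to 'unknown'); buckets are concatenated
--     in index order, followed by the unknown names sorted alphabetically."""
--     if mode == "alphabetical":
--         return sorted(branch_list)
--
--     order = custom_order if (mode == "custom" and custom_order) else DEFAULT_BRANCH_ORDER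
--     order_map = {name: i for i, name in enumerate(order)}
--
--     buckets: list[list[str]] = [[] for _ in range(len(order))]
--     unknown: list[str] = []
--     for b in branch_list:
--         i = order_map.get(b)
--         if i is None:
--             unknown.append(b)
--         else:
--             buckets[i].append(b)
--
--     result: list[str] = []
--     for bucket in buckets:
--         result.extend(bucket)
--     result.extend(sorted(unknown))
--     return result
-- ===== Notes on version B (the rewrite author's own statement) =====
-- stated objective: alternative
-- what changed: Replaces the comparison sort with a (order_map.get, name) key by a single-pass bucket distribution: each branch is appended to the bucket of its order index (or to an unknown list), buckets are concatenated in index order and the unknowns are sorted alphabetically at the end.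
import Mathlib
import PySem

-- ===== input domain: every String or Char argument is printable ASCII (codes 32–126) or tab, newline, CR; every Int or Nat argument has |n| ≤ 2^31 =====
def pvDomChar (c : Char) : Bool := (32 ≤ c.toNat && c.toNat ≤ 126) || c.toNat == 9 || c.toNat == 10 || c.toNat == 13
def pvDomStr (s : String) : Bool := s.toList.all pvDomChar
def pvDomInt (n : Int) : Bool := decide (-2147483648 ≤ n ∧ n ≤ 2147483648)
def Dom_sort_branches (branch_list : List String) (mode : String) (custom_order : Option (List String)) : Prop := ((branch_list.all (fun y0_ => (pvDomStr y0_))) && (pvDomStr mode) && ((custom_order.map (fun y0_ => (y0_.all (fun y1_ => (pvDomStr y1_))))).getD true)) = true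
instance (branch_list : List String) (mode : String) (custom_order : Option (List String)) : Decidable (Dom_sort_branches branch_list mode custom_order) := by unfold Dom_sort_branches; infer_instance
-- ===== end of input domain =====

-- B replaces the keyed comparison sort by a one-pass bucket distribution over the order
-- positions (unknown names collected separately and sorted alphabetically at the end);
-- objective: alternative algorithm of similar cost.

-- ===== PORT A =====
def pyDEFAULT_BRANCH_ORDER : List String :=
  ["Area of Law", "Service", "Objectives", "Industry and Market", "Actor / Player",
   "Forums and Venues", "Governmental Body", "Document / Artifact", "Legal Entity",
   "Event", "Location", "Engagement Attributes", "Asset Type", "Legal Authorities",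
   "Legal Use Cases", "Status", "Communication Modality", "Financial Concepts and Metrics",
   "Currency", "Matter Narrative", "Data Format", "Language", "System Identifiers"]

-- {name: i for i, name in enumerate(order)}  (shared: both Pythons build order_map this way)
def pyOrderMap (order : List String) : PySem.Dict String Int :=
  (PySem.List.enumerate order).foldl (fun d p => d.insert p.2 p.1) PySem.Dict.empty

def sort_branches (branch_list : List String) (mode : String) (custom_order : Option (List String)) : List String :=
  if mode == "alphabetical" then
    PySem.List.sorted branch_list (fun x => x)
  else if mode == "custom" && !(custom_order.getD []).isEmpty then
    -- 'custom_order' is truthy: non-None and non-empty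
    let order_map := pyOrderMap (custom_order.getD [])
    let fallback : Int := ((custom_order.getD []).length : Int)
    PySem.List.sorted2 branch_list (fun b => order_map.getD b fallback) (fun b => b)
  else
    let order_map := pyOrderMap pyDEFAULT_BRANCH_ORDER
    let fallback : Int := (pyDEFAULT_BRANCH_ORDER.length : Int)
    PySem.List.sorted2 branch_list (fun b => order_map.getD b fallback) (fun b => b)

-- ===== PORT B =====
def sort_branches_alt (branch_list : List String) (mode : String) (custom_order : Option (List String)) : List String :=
  if mode == "alphabetical" then
    PySem.List.sorted branch_list (fun x => x)
  else
    let order := if mode == "custom" && !(custom_order.getD []).isEmpty then custom_order.getD [] else pyDEFAULT_BRANCH_ORDER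
    let order_map := pyOrderMap order
    -- one pass: route each branch to its bucket (order_map values are always in range)
    let st := branch_list.foldl (fun st b =>
        match order_map.get? b with
        | none => (st.1, st.2 ++ [b])
        | some i => (st.1.set i.toNat (st.1.getD i.toNat [] ++ [b]), st.2))
      (List.replicate order.length ([] : List String), ([] : List String))
    (st.1.foldl (fun acc bucket => acc ++ bucket) []) ++ PySem.List.sorted st.2 (fun x => x)

-- ===== PRECONDITION & SPEC =====
def Spec_sort_branches (branch_list : List String) (mode : String) (custom_order : Option (List String)) (out : List String) : Prop := out = sort_branches_alt branch_list mode custom_order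
instance (branch_list : List String) (mode : String) (custom_order : Option (List String)) (out : List String) : Decidable (Spec_sort_branches branch_list mode custom_order out) := by unfold Spec_sort_branches; infer_instance

-- ===== CLAIM (what is proved, stated in full; the proofs are below) =====
def Claim_equal_sort_branches : Prop := ∀ (branch_list : List String) (mode : String) (custom_order : Option (List String)), Dom_sort_branches branch_list mode custom_order → Spec_sort_branches branch_list mode custom_order (sort_branches branch_list mode custom_order)

-- ===== LEMMAS AND PROOFS =====
-- invariant of the order_map build: values in [0, m), distinct values only for equal keys
def pvInv (d : PySem.Dict String Int) (m : Int) : Prop :=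
  (∀ k v, d.get? k = some v → 0 ≤ v ∧ v < m) ∧
  (∀ k k' v, d.get? k = some v → d.get? k' = some v → k = k')

theorem pvInv_fold (l : List String) : ∀ (m : Int) (d : PySem.Dict String Int), 0 ≤ m → pvInv d m →
    pvInv ((PySem.List.enumerate l m).foldl (fun d p => d.insert p.2 p.1) d) (m + l.length) := by
  induction l with
  | nil => intro m d _ h; simpa [PySem.List.enumerate] using h
  | cons x t ih =>
    intro m d hm h
    have step : pvInv (d.insert x m) (m + 1) := by
      constructor
      · intro k v hv
        rw [PySem.Dict.get?_insert] at hv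
        split at hv
        · cases hv; omega
        · have := h.1 k v hv; omega
      · intro k k' v hv hv'
        rw [PySem.Dict.get?_insert] at hv hv'
        split at hv <;> split at hv' <;> rename_i e1 e2
        · rw [e1, e2]
        · cases hv; exact absurd (h.1 k' m hv').2 (by omega)
        · cases hv'; exact absurd (h.1 k m hv).2 (by omega)
        · exact h.2 k k' v hv hv'
    have := ih (m + 1) (d.insert x m) (by omega) step
    simp only [PySem.List.enumerate, List.foldl_cons, List.length_cons]
    have hc : (m + ((t.length + 1 : Nat) : Int)) = (m + 1) + (t.length : Int) := by push_cast; ring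
    rw [hc]; exact this

theorem pvOrderMap_inv (order : List String) : pvInv (pyOrderMap order) ((order.length : Int)) := by
  have := pvInv_fold order 0 PySem.Dict.empty le_rfl
    ⟨fun k v hv => by simp [PySem.Dict.get?_empty] at hv,
     fun k k' v hv _ => by simp [PySem.Dict.get?_empty] at hv⟩
  simpa [pyOrderMap] using this

-- sorted2 with keys (k1, k2) is sorted with the lexicographic key
theorem pvSorted2_eq_sorted_toLex (xs : List String) (k1 : String → Int) (k2 : String → String) :
    PySem.List.sorted2 xs k1 k2 = PySem.List.sorted xs (fun x => toLex (k1 x, k2 x)) := by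
  rw [PySem.List.sorted_eq_foldl_insertBy]
  show List.foldl (fun acc x => PySem.List.insertBy _ x acc) [] xs = _
  have hfun : (fun a b => decide (k1 a < k1 b) || (!decide (k1 b < k1 a) && decide (k2 a < k2 b)))
      = (fun a b : String => decide (toLex (k1 a, k2 a) < toLex (k1 b, k2 b))) := by
    funext a b
    rcases lt_trichotomy (k1 a) (k1 b) with h | h | h
    · simp [h, Prod.Lex.lt_iff, not_lt_of_gt h]
    · simp [h, Prod.Lex.lt_iff]
    · simp [Prod.Lex.lt_iff, not_lt_of_gt h, h, h.ne']
  simp only [hfun, Bool.false_eq_true, if_false]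

-- characterization of B's distribution fold
theorem pvFold_spec (M : String → Option Int) (xs : List String) :
    ∀ (bs : List (List String)) (u : List String),
    (∀ b i, M b = some i → 0 ≤ i ∧ i.toNat < bs.length) →
    xs.foldl (fun st b =>
        match M b with
        | none => (st.1, st.2 ++ [b])
        | some i => (st.1.set i.toNat (st.1.getD i.toNat [] ++ [b]), st.2)) (bs, u)
      = (bs.mapIdx (fun j bucket => bucket ++ xs.filter (fun b => M b == some (j : Int))),
         u ++ xs.filter (fun b => (M b).isNone)) := by
  induction xs with
  | nil =>
    intro bs u _
    refine Prod.ext ?_ (by simp)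
    refine (List.ext_getElem (by simp) ?_).symm
    intro i h1 h2
    simp
  | cons b t ih =>
    intro bs u hb
    rcases hM : M b with _ | i
    · simp only [List.foldl_cons, hM]
      rw [ih bs (u ++ [b]) hb]
      refine Prod.ext ?_ (by simp [hM])
      simp only [List.filter_cons, hM]
      simp
    · have hib := hb b i hM
      have hlen : (bs.set i.toNat (bs.getD i.toNat [] ++ [b])).length = bs.length := by simp
      simp only [List.foldl_cons, hM]
      rw [ih _ u (by rw [hlen]; exact hb)]
      refine Prod.ext ?_ (by simp [hM])
      refine List.ext_getElem (by simp) ?_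
      intro j h1 h2
      simp only [List.getElem_mapIdx]
      rw [List.getElem_set]
      by_cases hji : i.toNat = j
      · subst hji
        have hcast : ((i.toNat : Nat) : Int) = i := Int.toNat_of_nonneg hib.1
        simp only [List.filter_cons, hM, hcast]
        simp [List.append_assoc, List.getElem?_eq_getElem (by simpa using hib.2 : i.toNat < bs.length)]
      · have hne : ¬ (M b == some (j : Int)) = true := by
          rw [hM]
          simp only [beq_iff_eq, Option.some.injEq]
          intro hc
          exact hji (by omega)
        simp only [if_neg hji, List.filter_cons, hne]
        simp

theorem pvMapIdx_replicate (n : Nat) (f : Nat → List String) :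
    (List.replicate n ([] : List String)).mapIdx (fun j bucket => bucket ++ f j)
      = (List.range n).map f := by
  refine List.ext_getElem (by simp) ?_
  intro j h1 h2
  simp

-- inserting one element into the segment of its index, over a duplicate-free index list
theorem pvFlatten_insert_one (b : String) (i0 : Nat) (g g' : Nat → List String) :
    ∀ (L : List Nat), L.Nodup → i0 ∈ L →
    (∀ j ∈ L, j ≠ i0 → g' j = g j) → g' i0 = b :: g i0 →
    ((L.map g').flatten).Perm (b :: (L.map g).flatten) := by
  intro L
  induction L with
  | nil => simp
  | cons j L' ih =>
    intro hnd hmem hg hgi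
    rcases List.mem_cons.1 hmem with rfl | hmem'
    · have heq : L'.map g' = L'.map g := by
        refine List.map_congr_left ?_
        intro x hx
        exact hg x (List.mem_cons_of_mem _ hx) (fun hc => (List.nodup_cons.1 hnd).1 (hc ▸ hx))
      simp only [List.map_cons, List.flatten_cons, hgi, heq]
      exact List.Perm.refl _
    · have hgj : g' j = g j := hg j (List.mem_cons_self) (fun hc => by
        subst hc; exact (List.nodup_cons.1 hnd).1 hmem')
      have ihp := ih (List.nodup_cons.1 hnd).2 hmem'
        (fun x hx hne => hg x (List.mem_cons_of_mem _ hx) hne) hgi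
      simp only [List.map_cons, List.flatten_cons, hgj]
      exact (ihp.append_left (g j)).trans List.perm_middle

theorem pvPerm_buckets (M : String → Option Int) (n : Nat) (xs : List String)
    (h : ∀ b i, M b = some i → 0 ≤ i ∧ i.toNat < n) :
    (((List.range n).map (fun j : Nat => xs.filter (fun b => M b == some (j : Int)))).flatten
      ++ xs.filter (fun b => (M b).isNone)).Perm xs := by
  induction xs with
  | nil => simp
  | cons b t iht =>
    rcases hM : M b with _ | i
    · have h1 : (List.range n).map (fun j : Nat => (b :: t).filter (fun b' => M b' == some (j : Int)))
          = (List.range n).map (fun j : Nat => t.filter (fun b' => M b' == some (j : Int))) :=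
        List.map_congr_left (fun j _ => by simp [hM])
      have h2 : (b :: t).filter (fun b' => (M b').isNone) = b :: t.filter (fun b' => (M b').isNone) := by
        simp [hM]
      rw [h1, h2]
      exact List.perm_middle.trans (iht.cons b)
    · have hi := h b i hM
      have h2 : (b :: t).filter (fun b' => (M b').isNone) = t.filter (fun b' => (M b').isNone) := by
        simp [hM]
      have key : (((List.range n).map (fun j : Nat => (b :: t).filter (fun b' => M b' == some (j : Int)))).flatten).Perm
          (b :: ((List.range n).map (fun j : Nat => t.filter (fun b' => M b' == some (j : Int)))).flatten) := by
        refine pvFlatten_insert_one b i.toNat _ _ (List.range n) (List.nodup_range)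
          (List.mem_range.2 hi.2) ?_ ?_
        · intro j _ hne
          have hne' : ¬ (M b == some (j : Int)) = true := by
            rw [hM]; simp only [beq_iff_eq, Option.some.injEq]; intro hc; exact hne (by omega)
          simp [hne']
        · simp [hM, Int.toNat_of_nonneg hi.1]
      rw [h2]
      exact (key.append_right _).trans (iht.cons b)

theorem pvMain (order : List String) (xs : List String) :
    PySem.List.sorted2 xs (fun b => (pyOrderMap order).getD b (order.length : Int)) (fun b => b)
      = (let st := xs.foldl (fun st b =>
            match (pyOrderMap order).get? b with
            | none => (st.1, st.2 ++ [b])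
            | some i => (st.1.set i.toNat (st.1.getD i.toNat [] ++ [b]), st.2))
          (List.replicate order.length ([] : List String), ([] : List String))
         (st.1.foldl (fun acc bucket => acc ++ bucket) []) ++ PySem.List.sorted st.2 (fun x => x)) := by
  have inv := pvOrderMap_inv order
  set n := order.length with hn
  set d := pyOrderMap order with hd
  have hbnd : ∀ b i, d.get? b = some i → 0 ≤ i ∧ i.toNat < n := by
    intro b i hbi
    have := inv.1 b i hbi
    constructor
    · exact this.1
    · omega
  -- rewrite B's side into segments
  rw [pvFold_spec (fun b => d.get? b) xs (List.replicate n []) [] (by simpa using hbnd)]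
  simp only [List.nil_append]
  rw [pvMapIdx_replicate n, PySem.List.foldl_append_eq_flatten, List.nil_append]
  -- rewrite A's side as a lex sort
  rw [pvSorted2_eq_sorted_toLex]
  set key : String → Lex (Int × String) := fun b => toLex (d.getD b (n : Int), b) with hkey
  set u := xs.filter (fun b => (d.get? b).isNone) with hu
  set segs := (List.range n).map (fun j : Nat => xs.filter (fun b => d.get? b == some (j : Int))) with hsegs
  -- key values
  have hkey_some : ∀ b (j : Int), d.get? b = some j → key b = toLex (j, b) := by
    intro b j hb
    simp [hkey, PySem.Dict.getD_eq_get?_getD, hb]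
  have hkey_none : ∀ b, d.get? b = none → key b = toLex ((n : Int), b) := by
    intro b hb
    simp [hkey, PySem.Dict.getD_eq_get?_getD, hb]
  have hmem_seg : ∀ (j : Nat), j < n → ∀ x ∈ xs.filter (fun b => d.get? b == some (j : Int)),
      d.get? x = some (j : Int) := by
    intro j _ x hx
    have := (List.mem_filter.1 hx).2
    simpa using this
  -- apply uniqueness of the stable order
  refine PySem.List.eq_of_perm_of_pairwise_le_of_injective key
    (fun a b hab => congrArg (fun p => (ofLex p).2) hab) ?_ ?_ ?_
  · -- Perm
    refine (PySem.List.sorted_perm xs key false).trans ?_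
    refine ((pvPerm_buckets (fun b => d.get? b) n xs hbnd).symm.trans ?_)
    exact ((PySem.List.sorted_perm u (fun x => x) false).symm.append_left segs.flatten)
  · exact PySem.List.sorted_pairwise xs key
  · -- Pairwise on B's result
    refine (List.pairwise_append).2 ⟨?_, ?_, ?_⟩
    · -- flatten of segments
      refine (List.pairwise_flatten).2 ⟨?_, ?_⟩
      · intro l hl
        rw [hsegs] at hl
        rcases List.mem_map.1 hl with ⟨j, hjr, rfl⟩
        have hjn := List.mem_range.1 hjr
        refine List.pairwise_of_forall_mem_list ?_
        intro x hx y hy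
        have hxj := hmem_seg j hjn x hx
        have hyj := hmem_seg j hjn y hy
        have : x = y := inv.2 x y _ hxj hyj
        rw [this]
      · rw [hsegs]
        rw [List.pairwise_map]
        refine List.pairwise_lt_range.imp ?_
        intro j j' hjj x hx y hy
        have hxj : d.get? x = some ((j : Nat) : Int) := by simpa using (List.mem_filter.1 hx).2
        have hyj : d.get? y = some ((j' : Nat) : Int) := by simpa using (List.mem_filter.1 hy).2
        rw [hkey_some x _ hxj, hkey_some y _ hyj, Prod.Lex.le_iff]
        left
        simp only [ofLex_toLex]
        exact_mod_cast hjj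
    · -- sorted unknowns
      have hperm := PySem.List.sorted_perm u (fun x => x) false
      refine (PySem.List.sorted_pairwise u (fun x => x)).imp_of_mem ?_
      intro x y hx hy hxy
      have hxu : d.get? x = none := by
        have := (List.mem_filter.1 (hperm.mem_iff.1 hx)).2
        simpa using this
      have hyu : d.get? y = none := by
        have := (List.mem_filter.1 (hperm.mem_iff.1 hy)).2
        simpa using this
      rw [hkey_none x hxu, hkey_none y hyu, Prod.Lex.le_iff]
      right
      exact ⟨rfl, hxy⟩
    · -- cross: bucketed before unknown
      intro x hx y hy
      rcases List.mem_flatten.1 hx with ⟨l, hl, hxl⟩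
      rw [hsegs] at hl
      rcases List.mem_map.1 hl with ⟨j, hjr, rfl⟩
      have hjn := List.mem_range.1 hjr
      have hxj := hmem_seg j hjn x hxl
      have hyu : d.get? y = none := by
        have hperm := PySem.List.sorted_perm u (fun x => x) false
        have := (List.mem_filter.1 (hperm.mem_iff.1 hy)).2
        simpa using this
      rw [hkey_some x _ hxj, hkey_none y hyu, Prod.Lex.le_iff]
      left
      simp only [ofLex_toLex]
      exact_mod_cast hjn

-- ===== VERDICT (by name: the statement is the Claim_ definition above) =====
theorem sort_branches_spec : Claim_equal_sort_branches := by
  intro branch_list mode custom_order _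
  unfold Spec_sort_branches sort_branches sort_branches_alt
  by_cases h1 : (mode == "alphabetical") = true
  · simp [h1]
  · by_cases h2 : (mode == "custom" && !(custom_order.getD []).isEmpty) = true
    · simp only [h1, h2, if_true, if_false, Bool.false_eq_true]
      exact pvMain (custom_order.getD []) branch_list
    · simp only [h1, h2, if_false, Bool.false_eq_true]
      exact pvMain pyDEFAULT_BRANCH_ORDER branch_list
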